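-- pv_equiv track=rewrite | github.com/ColeMorton/trading | app/tools/processing/performance_dashboard.py | _get_health_recommendations
-- ===== SOURCE A (Python) =====
-- from typing import Any
--
-- def _get_health_recommendations(health_factors: dict[str, Any]) -> list[str]:
--     """Get health improvement recommendations."""
--     recommendations = []
--
--     for factor_name, factor_data in health_factors.items():
--         score = factor_data["score"]
--
--         if factor_name == "performance" and score < 75:
--             recommendations.append(
--                 "Consider enabling auto-tuning to optimize thread pool sizes",
--             )
--             recommendations.append(
--                 "Review slow operations and enable pre-computation for common queries",
--             )
--
--         if factor_name == "memory" and score < 75: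
--             recommendations.append(
--                 "Enable memory optimization features like DataFrame optimization",
--             )
--             recommendations.append(
--                 "Consider reducing cache size or increasing memory cleanup frequency",
--             )
--
--         if factor_name == "cache" and score < 75:
--             recommendations.append(
--                 "Review cache warming strategies to improve hit rates",
--             )
--             recommendations.append("Increase cache size if memory allows")
--
--         if factor_name == "reliability" and score < 75:
--             recommendations.append(
--                 "Investigate error patterns and improve error handling",
--             )
--             recommendations.append(
--                 "Enable streaming processing for large file operations",
--             )
--
--     return recommendations
-- ===== SOURCE B (Python) =====
-- # Flat 8-row (factor, recommendation) table; recursive decomposition with an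
-- # inner scan over the table instead of A's per-name if/append chain.
-- _TABLE = [
--     ("performance", "Consider enabling auto-tuning to optimize thread pool sizes"),
--     ("performance", "Review slow operations and enable pre-computation for common queries"),
--     ("memory", "Enable memory optimization features like DataFrame optimization"),
--     ("memory", "Consider reducing cache size or increasing memory cleanup frequency"),
--     ("cache", "Review cache warming strategies to improve hit rates"),
--     ("cache", "Increase cache size if memory allows"),
--     ("reliability", "Investigate error patterns and improve error handling"),
--     ("reliability", "Enable streaming processing for large file operations"),
-- ]
--
--
-- def _get_health_recommendations(health_factors):
--     """Get health improvement recommendations (recursive, flat-table scan)."""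
--     items = list(health_factors.items())
--
--     def go(i):
--         if i == len(items):
--             return []
--         factor_name, factor_data = items[i]
--         score = factor_data["score"]
--         here = [rec for tname, rec in _TABLE if tname == factor_name and score < 75]
--         return here + go(i + 1)
--
--     return go(0)
-- ===== Notes on version B (the rewrite author's own statement) =====
-- stated objective: alternative
-- what changed: Replaces A's iterative loop of four per-name if/append blocks by a recursive decomposition over the items that, per factor, scans a flat 8-row (factor, recommendation) table and concatenates the matching rows.
import Mathlib
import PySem

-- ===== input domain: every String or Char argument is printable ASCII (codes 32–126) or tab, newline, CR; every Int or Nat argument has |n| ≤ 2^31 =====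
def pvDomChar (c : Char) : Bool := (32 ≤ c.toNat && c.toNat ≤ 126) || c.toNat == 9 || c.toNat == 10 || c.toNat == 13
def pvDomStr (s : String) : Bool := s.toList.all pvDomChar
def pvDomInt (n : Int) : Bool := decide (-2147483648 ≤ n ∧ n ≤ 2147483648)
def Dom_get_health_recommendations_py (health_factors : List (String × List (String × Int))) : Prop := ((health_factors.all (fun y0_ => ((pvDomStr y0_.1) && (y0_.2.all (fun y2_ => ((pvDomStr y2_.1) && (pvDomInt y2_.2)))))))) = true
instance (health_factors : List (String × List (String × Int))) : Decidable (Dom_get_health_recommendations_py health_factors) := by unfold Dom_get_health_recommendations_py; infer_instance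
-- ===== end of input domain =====

-- B replaces A's loop of four if/append blocks by a recursion over the items with a flat-table scan (objective: alternative).

-- ===== PORT A =====
-- factor_data["score"]: KeyError (none) when "score" is absent — excluded by Pre_; the getD 0 default is never reached inside Pre_.
def get_health_recommendations_py (health_factors : List (String × List (String × Int))) : List String :=
  health_factors.foldl (fun recommendations p =>
    let score := ((PySem.Dict.mk p.2).get? "score").getD 0
    let recommendations := if p.1 = "performance" ∧ score < 75 then
        recommendations ++ ["Consider enabling auto-tuning to optimize thread pool sizes",
                            "Review slow operations and enable pre-computation for common queries"]
      else recommendations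
    let recommendations := if p.1 = "memory" ∧ score < 75 then
        recommendations ++ ["Enable memory optimization features like DataFrame optimization",
                            "Consider reducing cache size or increasing memory cleanup frequency"]
      else recommendations
    let recommendations := if p.1 = "cache" ∧ score < 75 then
        recommendations ++ ["Review cache warming strategies to improve hit rates",
                            "Increase cache size if memory allows"]
      else recommendations
    let recommendations := if p.1 = "reliability" ∧ score < 75 then
        recommendations ++ ["Investigate error patterns and improve error handling",
                            "Enable streaming processing for large file operations"]
      else recommendations
    recommendations) []

-- ===== PORT B =====
-- the flat (factor, recommendation) table _TABLE from Source B
def pvTABLE : List (String × String) :=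
  [("performance", "Consider enabling auto-tuning to optimize thread pool sizes"),
   ("performance", "Review slow operations and enable pre-computation for common queries"),
   ("memory", "Enable memory optimization features like DataFrame optimization"),
   ("memory", "Consider reducing cache size or increasing memory cleanup frequency"),
   ("cache", "Review cache warming strategies to improve hit rates"),
   ("cache", "Increase cache size if memory allows"),
   ("reliability", "Investigate error patterns and improve error handling"),
   ("reliability", "Enable streaming processing for large file operations")]

-- Source B's recursive go over the remaining items
def pvGo (items : List (String × List (String × Int))) : List String :=
  match items with
  | [] => []
  | p :: t =>
      let score := ((PySem.Dict.mk p.2).get? "score").getD 0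
      let here := (pvTABLE.filter (fun q => q.1 == p.1 && decide (score < 75))).map (·.2)
      here ++ pvGo t

def get_health_recommendations_py_alt (health_factors : List (String × List (String × Int))) : List String :=
  pvGo health_factors

-- ===== PRECONDITION & SPEC =====
-- Pre_ excludes inputs where some factor_data lacks the "score" key: A raises KeyError there (B does too).
def Pre_get_health_recommendations_py (health_factors : List (String × List (String × Int))) : Prop :=
  health_factors.all (fun p => p.2.any (fun q => q.1 == "score")) = true
instance (health_factors : List (String × List (String × Int))) : Decidable (Pre_get_health_recommendations_py health_factors) := by unfold Pre_get_health_recommendations_py; infer_instance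
def pvWitness_get_health_recommendations_py : (List (String × List (String × Int))) :=
  [("performance", [("score", 50)]), ("cache", [("score", 90)])]
def Spec_get_health_recommendations_py (health_factors : List (String × List (String × Int))) (out : List String) : Prop := out = get_health_recommendations_py_alt health_factors
instance (health_factors : List (String × List (String × Int))) (out : List String) : Decidable (Spec_get_health_recommendations_py health_factors out) := by unfold Spec_get_health_recommendations_py; infer_instance

-- ===== CLAIM (what is proved, stated in full; the proofs are below) =====
def Claim_equal_get_health_recommendations_py : Prop := ∀ (health_factors : List (String × List (String × Int))), Dom_get_health_recommendations_py health_factors → Pre_get_health_recommendations_py health_factors → Spec_get_health_recommendations_py health_factors (get_health_recommendations_py health_factors)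

-- ===== LEMMAS AND PROOFS =====

-- the per-factor chunk A appends equals B's table filter
theorem pv_step (p : String × List (String × Int)) (acc : List String) :
    (let score := ((PySem.Dict.mk p.2).get? "score").getD 0
     let r1 := if p.1 = "performance" ∧ score < 75 then
        acc ++ ["Consider enabling auto-tuning to optimize thread pool sizes",
                "Review slow operations and enable pre-computation for common queries"]
      else acc
     let r2 := if p.1 = "memory" ∧ score < 75 then
        r1 ++ ["Enable memory optimization features like DataFrame optimization",
               "Consider reducing cache size or increasing memory cleanup frequency"]
      else r1
     let r3 := if p.1 = "cache" ∧ score < 75 then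
        r2 ++ ["Review cache warming strategies to improve hit rates",
               "Increase cache size if memory allows"]
      else r2
     let r4 := if p.1 = "reliability" ∧ score < 75 then
        r3 ++ ["Investigate error patterns and improve error handling",
               "Enable streaming processing for large file operations"]
      else r3
     r4) =
    acc ++ (pvTABLE.filter (fun q =>
        q.1 == p.1 && decide (((PySem.Dict.mk p.2).get? "score").getD 0 < 75))).map (·.2) := by
  obtain ⟨name, data⟩ := p
  by_cases hs : ((PySem.Dict.mk data).get? "score").getD 0 < 75
  · have hd : decide (((PySem.Dict.mk data).get? "score").getD 0 < 75) = true := decide_eq_true hs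
    by_cases h1 : name = "performance"
    · subst h1; simp [pvTABLE, List.filter, hd, hs]
    · by_cases h2 : name = "memory"
      · subst h2; simp [pvTABLE, List.filter, hd, hs]
      · by_cases h3 : name = "cache"
        · subst h3; simp [pvTABLE, List.filter, hd, hs]
        · by_cases h4 : name = "reliability"
          · subst h4; simp [pvTABLE, List.filter, hd, hs]
          · have e1 : ("performance" == name) = false := beq_eq_false_iff_ne.mpr (Ne.symm h1)
            have e2 : ("memory" == name) = false := beq_eq_false_iff_ne.mpr (Ne.symm h2)
            have e3 : ("cache" == name) = false := beq_eq_false_iff_ne.mpr (Ne.symm h3)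
            have e4 : ("reliability" == name) = false := beq_eq_false_iff_ne.mpr (Ne.symm h4)
            simp [pvTABLE, List.filter, e1, e2, e3, e4, h1, h2, h3, h4]
  · have hd : decide (((PySem.Dict.mk data).get? "score").getD 0 < 75) = false := decide_eq_false hs
    simp [pvTABLE, List.filter, hd, hs]

theorem pv_fold (l : List (String × List (String × Int))) (acc : List String) :
    l.foldl (fun recommendations p =>
      let score := ((PySem.Dict.mk p.2).get? "score").getD 0
      let recommendations := if p.1 = "performance" ∧ score < 75 then
          recommendations ++ ["Consider enabling auto-tuning to optimize thread pool sizes",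
                              "Review slow operations and enable pre-computation for common queries"]
        else recommendations
      let recommendations := if p.1 = "memory" ∧ score < 75 then
          recommendations ++ ["Enable memory optimization features like DataFrame optimization",
                              "Consider reducing cache size or increasing memory cleanup frequency"]
        else recommendations
      let recommendations := if p.1 = "cache" ∧ score < 75 then
          recommendations ++ ["Review cache warming strategies to improve hit rates",
                              "Increase cache size if memory allows"]
        else recommendations
      let recommendations := if p.1 = "reliability" ∧ score < 75 then
          recommendations ++ ["Investigate error patterns and improve error handling",
                              "Enable streaming processing for large file operations"]
        else recommendations
      recommendations) acc
    = acc ++ pvGo l := by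
  induction l generalizing acc with
  | nil => simp [pvGo]
  | cons p t ih =>
      rw [List.foldl_cons, show _ = acc ++ _ from pv_step p acc, ih, pvGo]
      simp

-- ===== VERDICT (by name: the statement is the Claim_ definition above) =====
theorem get_health_recommendations_py_spec : Claim_equal_get_health_recommendations_py := by
  intro hf _ _
  show get_health_recommendations_py hf = get_health_recommendations_py_alt hf
  unfold get_health_recommendations_py get_health_recommendations_py_alt
  simpa using pv_fold hf []
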